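-- pv_equiv track=rewrite | github.com/tengshan2008/python_algorithm_learning | 128_example/T9.py | predictive_text
-- ===== SOURCE A (Python) =====
-- t9 = "22233344455566677778889999"
--
-- def letter_digit(x):
--     assert 'a' <= x and x <= 'z'
--     return t9[ord(x)-ord('a')]
--
-- def word_code(words):
--     return ''.join(map(letter_digit, words))
--
-- def predictive_text(dico : dict):
--     freq = {}
--     for words, weights in dico:
--         prefix = ""
--         for x in words:
--             prefix += x
--             if prefix in freq:
--                 freq[prefix] += weights
--             else:
--                 freq[prefix] = weights
--
--     prop = {}
--     for prefix in freq:
--         code = word_code(prefix)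
--         if code not in prop or freq[prop[code]] < freq[prefix]:
--             prop[code] = prefix
--     return prop
-- ===== SOURCE B (Python) =====
-- t9 = "22233344455566677778889999"
--
-- def letter_digit(x):
--     assert 'a' <= x and x <= 'z'
--     return t9[ord(x)-ord('a')]
--
-- def word_code(words):
--     return ''.join(map(letter_digit, words))
--
-- def predictive_text(dico):
--     # accumulate prefix weights via slices and .get
--     freq = {}
--     for words, weights in dico:
--         for i in range(1, len(words) + 1):
--             prefix = words[:i]
--             freq[prefix] = freq.get(prefix, 0) + weights
--     # group the prefixes by their T9 code (first-seen code order), then take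
--     # the first heaviest prefix of each group (Python's max keeps the first tie)
--     groups = {}
--     for prefix in freq:
--         groups.setdefault(word_code(prefix), []).append(prefix)
--     return {code: max(prefixes, key=lambda p: freq[p]) for code, prefixes in groups.items()}
-- ===== Notes on version B (the rewrite author's own statement) =====
-- stated objective: alternative
-- what changed: B builds freq from explicit slices words[:i] with dict.get instead of an accumulated prefix with if/else, and replaces A's running-max second pass by grouping all prefixes per T9 code and taking max(group, key=freq-lookup) for each group (Python's max keeps the first of equal-weight prefixes, exactly A's strict-< update).
import Mathlib
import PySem

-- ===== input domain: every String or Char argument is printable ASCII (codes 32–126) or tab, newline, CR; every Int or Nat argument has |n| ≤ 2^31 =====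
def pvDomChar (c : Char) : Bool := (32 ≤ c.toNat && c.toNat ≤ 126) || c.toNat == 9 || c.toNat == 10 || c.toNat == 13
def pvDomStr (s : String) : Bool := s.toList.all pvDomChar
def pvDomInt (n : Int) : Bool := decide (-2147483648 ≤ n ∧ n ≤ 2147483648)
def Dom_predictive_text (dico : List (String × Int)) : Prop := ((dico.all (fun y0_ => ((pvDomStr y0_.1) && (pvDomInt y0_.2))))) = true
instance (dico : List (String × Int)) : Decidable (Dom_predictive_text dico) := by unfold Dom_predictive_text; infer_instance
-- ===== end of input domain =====

-- B replaces A's running-max second pass by group-prefixes-by-code then take the first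
-- heaviest pfx0 of each group (objective: alternative decomposition, same cost).

-- ===== PORT A =====
-- t9 = "22233344455566677778889999"
def pvT9 : List Char := "22233344455566677778889999".toList

-- letter_digit: the assert 'a' <= x <= 'z' is guaranteed by Pre_; there t9[ord(x)-ord('a')] is in range,
-- so getD's default is unreachable
def pvLetterDigit (x : Char) : Char := pvT9.getD (x.toNat - 'a'.toNat) '?'

-- word_code: ''.join(map(letter_digit, words)) (strings handled as lists of chars)
def pvWordCode (w : List Char) : List Char := w.map pvLetterDigit

-- the freq-building loop of A: pfx0 accumulates character by character
def pvFreqA (dico : List (String × Int)) : PySem.Dict (List Char) Int :=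
  dico.foldl
    (fun freq wp =>
      (wp.1.toList.foldl
        (fun st x =>
          let pfx0 := st.1 ++ [x]
          if st.2.contains pfx0 then (pfx0, st.2.insert pfx0 (st.2.getD pfx0 0 + wp.2))
          else (pfx0, st.2.insert pfx0 wp.2))
        (([] : List Char), freq)).2)
    PySem.Dict.empty

-- the second loop of A: running max per code (freq[...] lookups are total under Pre_, the keys are present)
def predictive_text (dico : List (String × Int)) : List (String × String) :=
  let freq := pvFreqA dico
  let prop := freq.keys.foldl
    (fun prop pfx0 =>
      let code := pvWordCode pfx0
      match prop.get? code with
      | none => prop.insert code pfx0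
      | some q => if freq.getD q 0 < freq.getD pfx0 0 then prop.insert code pfx0 else prop)
    PySem.Dict.empty
  prop.items.map (fun p => (String.mk p.1, String.mk p.2))

-- ===== PORT B =====
-- B's freq loop: for i in range(1, len(words)+1): pfx0 = words[:i]; freq[pfx0] = freq.get(pfx0, 0) + weights
-- (words[:i] with 1 <= i <= len(words) is .take i)
def pvFreqB (dico : List (String × Int)) : PySem.Dict (List Char) Int :=
  dico.foldl
    (fun freq wp =>
      (PySem.List.pyRange 1 ((wp.1.toList.length : Int) + 1) 1).foldl
        (fun freq i =>
          let pfx0 := wp.1.toList.take i.toNat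
          freq.insert pfx0 (freq.getD pfx0 0 + wp.2))
        freq)
    PySem.Dict.empty

-- groups.setdefault(code, []).append(pfx0) is d[code] = d.get(code, []) + [pfx0] = Dict.modify;
-- the final dict comprehension takes max(prefixes, key=...) per group (groups are nonempty: getD's [] is unreachable)
def predictive_text_alt (dico : List (String × Int)) : List (String × String) :=
  let freq := pvFreqB dico
  let groups := freq.keys.foldl
    (fun g pfx0 => g.modify (pvWordCode pfx0) [] (· ++ [pfx0]))
    PySem.Dict.empty
  let res := groups.items.foldl
    (fun d cp => d.insert cp.1 ((PySem.List.max? cp.2 (fun p => freq.getD p 0)).getD []))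
    PySem.Dict.empty
  res.items.map (fun p => (String.mk p.1, String.mk p.2))

-- ===== PRECONDITION & SPEC =====
-- Pre_ excludes inputs with a character outside 'a'..'z' in some word: there A's assert raises AssertionError.
def Pre_predictive_text (dico : List (String × Int)) : Prop :=
  (dico.all (fun p => p.1.toList.all (fun c => decide ('a' ≤ c) && decide (c ≤ 'z')))) = true
instance (dico : List (String × Int)) : Decidable (Pre_predictive_text dico) := by unfold Pre_predictive_text; infer_instance
def pvWitness_predictive_text : (List (String × Int)) := [("ab", 2), ("ad", 1), ("b", 3)]

def Spec_predictive_text (dico : List (String × Int)) (out : List (String × String)) : Prop := out = predictive_text_alt dico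
instance (dico : List (String × Int)) (out : List (String × String)) : Decidable (Spec_predictive_text dico out) := by unfold Spec_predictive_text; infer_instance

-- ===== CLAIM (what is proved, stated in full; the proofs are below) =====
def Claim_equal_predictive_text : Prop := ∀ (dico : List (String × Int)), Dom_predictive_text dico → Pre_predictive_text dico → Spec_predictive_text dico (predictive_text dico)

-- ===== LEMMAS AND PROOFS =====

-- the list of nonempty prefixes of w, each preceded by pre (the accumulator of A's inner loop)
def pvPfx : List Char → List Char → List (List Char)
  | _, [] => []
  | pre, x :: t => (pre ++ [x]) :: pvPfx (pre ++ [x]) t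

-- the common form of one freq update
def pvIns (wt : Int) (freq : PySem.Dict (List Char) Int) (p : List Char) : PySem.Dict (List Char) Int :=
  freq.insert p (freq.getD p 0 + wt)

theorem pvFreqA_inner (wt : Int) :
    ∀ (w : List Char) (pre : List Char) (freq : PySem.Dict (List Char) Int),
    (w.foldl
        (fun st x =>
          let pfx0 := st.1 ++ [x]
          if st.2.contains pfx0 then (pfx0, st.2.insert pfx0 (st.2.getD pfx0 0 + wt))
          else (pfx0, st.2.insert pfx0 wt))
        (pre, freq)).2
      = (pvPfx pre w).foldl (pvIns wt) freq := by
  intro w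
  induction w with
  | nil => intro pre freq; rfl
  | cons x t ih =>
    intro pre freq
    simp only [List.foldl_cons, pvPfx]
    have hstep :
        (let pfx0 := pre ++ [x]
         if freq.contains pfx0 then (pfx0, freq.insert pfx0 (freq.getD pfx0 0 + wt))
         else (pfx0, freq.insert pfx0 wt))
        = (pre ++ [x], pvIns wt freq (pre ++ [x])) := by
      by_cases h : freq.contains (pre ++ [x])
      · simp only [h, if_true, pvIns]
      · have hc : freq.contains (pre ++ [x]) = false := by simpa using h
        simp only [h, if_false, Bool.false_eq_true, pvIns,
          PySem.Dict.getD_of_not_contains, hc, zero_add]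
    rw [hstep, ih]

theorem pvPfx_eq (w : List Char) (pre : List Char) :
    pvPfx pre w = (List.range w.length).map (fun k => pre ++ w.take (k+1)) := by
  induction w generalizing pre with
  | nil => rfl
  | cons x t ih =>
    simp only [pvPfx, List.length_cons, List.range_succ_eq_map, List.map_cons, List.map_map, ih]
    refine congrArg₂ List.cons (by simp) ?_
    refine List.map_congr_left (fun k _ => ?_)
    simp [Function.comp, Nat.succ_eq_add_one, List.take_succ_cons, List.append_assoc]

theorem pvFreq_eq (dico : List (String × Int)) : pvFreqA dico = pvFreqB dico := by
  unfold pvFreqA pvFreqB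
  congr 1
  funext freq wp
  rw [pvFreqA_inner, pvPfx_eq, PySem.List.pyRange_one, List.foldl_map, List.foldl_map]
  have hn : ((wp.1.toList.length : Int) + 1 - 1).toNat = wp.1.toList.length := by omega
  rw [hn]
  congr 1
  funext f k
  simp only [pvIns, List.nil_append]
  have h1 : ((1 : Int) + (k : Int)).toNat = k + 1 := by omega
  rw [h1]

-- abbreviations for the second phase
def pvMx (freq : PySem.Dict (List Char) Int) (l : List (List Char)) : List Char :=
  (PySem.List.max? l (fun p => freq.getD p 0)).getD []

def pvSpecD (freq : PySem.Dict (List Char) Int) (ks : List (List Char)) : PySem.Dict (List Char) (List Char) :=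
  PySem.Dict.mk ((PySem.List.dedup (ks.map pvWordCode)).map
    (fun c => (c, pvMx freq (ks.filter (fun p => pvWordCode p == c)))))

theorem pvGet_map_graph (cs : List (List Char)) (g : List Char → List Char) (c : List Char) :
    (PySem.Dict.mk (cs.map (fun c => (c, g c)))).get? c
      = if c ∈ cs then some (g c) else none := by
  induction cs with
  | nil => simp [PySem.Dict.get?]
  | cons a t ih =>
    simp only [List.map_cons, PySem.Dict.get?_mk_cons, ih]
    by_cases h : a = c
    · subst h; simp
    · simp [h, beq_iff_eq, Ne.symm h]

theorem pvMax?_append_some (l : List (List Char)) (x m : List Char) (key : List Char → Int)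
    (h : PySem.List.max? l key = some m) :
    PySem.List.max? (l ++ [x]) key = some (if key m < key x then x else m) := by
  simp only [PySem.List.max?] at h ⊢
  rw [List.foldl_append, h, List.foldl_cons, List.foldl_nil]
  by_cases h2 : key m < key x <;> simp [h2]

theorem pvPropA_eq (freq : PySem.Dict (List Char) Int) (ks : List (List Char)) :
    ks.foldl
      (fun prop pfx0 =>
        let code := pvWordCode pfx0
        match prop.get? code with
        | none => prop.insert code pfx0
        | some q => if freq.getD q 0 < freq.getD pfx0 0 then prop.insert code pfx0 else prop)
      PySem.Dict.empty
    = pvSpecD freq ks := by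
  induction ks using List.reverseRecOn with
  | nil => rfl
  | append_singleton l p ih =>
    rw [List.foldl_append, List.foldl_cons, List.foldl_nil, ih]
    by_cases hmem : pvWordCode p ∈ PySem.List.dedup (List.map pvWordCode l)
    · -- the code of p is already a key: A's branch is the running-max update
      have hex : ∃ q, q ∈ l ∧ pvWordCode q = pvWordCode p := by
        rcases List.mem_map.mp ((PySem.List.mem_dedup _ _).mp hmem) with ⟨q, hq, hc⟩
        exact ⟨q, hq, hc⟩
      have hne : l.filter (fun q => pvWordCode q == pvWordCode p) ≠ [] := by
        rcases hex with ⟨q, hq, hc⟩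
        intro hnil
        have hqm : q ∈ l.filter (fun q => pvWordCode q == pvWordCode p) :=
          List.mem_filter.mpr ⟨hq, by simp [hc]⟩
        rw [hnil] at hqm
        exact absurd hqm (List.not_mem_nil)
      obtain ⟨m, hm⟩ : ∃ m, PySem.List.max? (l.filter (fun q => pvWordCode q == pvWordCode p))
          (fun r => freq.getD r 0) = some m := by
        cases hmx : PySem.List.max? (l.filter (fun q => pvWordCode q == pvWordCode p))
            (fun r => freq.getD r 0) with
        | none => exact absurd ((PySem.List.max?_eq_none_iff _ _).mp hmx) hne
        | some m => exact ⟨m, rfl⟩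
      have hget : (pvSpecD freq l).get? (pvWordCode p) = some m := by
        rw [pvSpecD, pvGet_map_graph, if_pos hmem]
        simp [pvMx, hm]
      have hcont : (pvSpecD freq l).contains (pvWordCode p) = true := by
        rw [PySem.Dict.contains_eq_isSome_get?, hget]; rfl
      have hmm : pvWordCode p ∈ List.map pvWordCode l := (PySem.List.mem_dedup _ _).mp hmem
      have hced : PySem.List.dedup (List.map pvWordCode (l ++ [p]))
          = PySem.List.dedup (List.map pvWordCode l) := by
        rw [List.map_append]
        simp only [PySem.List.dedup_eq_ofList, PySem.Set.ofList_append, List.map_cons,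
          List.map_nil, PySem.Set.update_cons, PySem.Set.mem_ofList, hmm,
          PySem.Set.add_of_mem, PySem.Set.update_nil]
      have hfilt : ∀ c', c' ≠ pvWordCode p →
          (l ++ [p]).filter (fun q => pvWordCode q == c') = l.filter (fun q => pvWordCode q == c') := by
        intro c' hne'
        simp [List.filter_append, beq_iff_eq, Ne.symm hne']
      have hfiltc : (l ++ [p]).filter (fun q => pvWordCode q == pvWordCode p)
          = l.filter (fun q => pvWordCode q == pvWordCode p) ++ [p] := by
        simp [List.filter_append]
      simp only [hget]
      by_cases hlt : freq.getD m 0 < freq.getD p 0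
      · rw [if_pos hlt]
        apply PySem.Dict.ext
        rw [PySem.Dict.items_insert_of_contains _ _ hcont]
        simp only [pvSpecD, hced, List.map_map]
        refine List.map_congr_left (fun c' hc' => ?_)
        by_cases hcc : c' = pvWordCode p
        · subst hcc
          simp [pvMx, hfiltc,
            pvMax?_append_some _ _ _ _ hm, hlt]
        · simp [beq_iff_eq, hcc, pvMx, hfilt c' hcc]
      · rw [if_neg hlt]
        apply PySem.Dict.ext
        simp only [pvSpecD, hced]
        refine List.map_congr_left (fun c' hc' => ?_)
        by_cases hcc : c' = pvWordCode p
        · subst hcc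
          simp [pvMx, hfiltc, pvMax?_append_some _ _ _ _ hm, hlt, hm]
        · simp [pvMx, hfilt c' hcc]
    · -- a fresh code: A appends, and p is the only prefix of its group
      have hnmap : pvWordCode p ∉ List.map pvWordCode l :=
        fun h => hmem ((PySem.List.mem_dedup _ _).mpr h)
      have hget : (pvSpecD freq l).get? (pvWordCode p) = none := by
        rw [pvSpecD, pvGet_map_graph, if_neg hmem]
      have hcont : (pvSpecD freq l).contains (pvWordCode p) = false := by
        rw [PySem.Dict.contains_eq_isSome_get?, hget]; rfl
      have hflt0 : l.filter (fun q => pvWordCode q == pvWordCode p) = [] := by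
        rw [List.filter_eq_nil_iff]
        intro q hq hqc
        simp only [beq_iff_eq] at hqc
        exact hnmap (List.mem_map.mpr ⟨q, hq, hqc⟩)
      have hced : PySem.List.dedup (List.map pvWordCode (l ++ [p]))
          = PySem.List.dedup (List.map pvWordCode l) ++ [pvWordCode p] := by
        rw [List.map_append]
        simp only [PySem.List.dedup_eq_ofList, PySem.Set.ofList_append, List.map_cons,
          List.map_nil, PySem.Set.update_cons, PySem.Set.mem_ofList, hnmap, not_false_eq_true,
          PySem.Set.add_of_not_mem, PySem.Set.update_nil]
      have hfilt : ∀ c', c' ≠ pvWordCode p →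
          (l ++ [p]).filter (fun q => pvWordCode q == c') = l.filter (fun q => pvWordCode q == c') := by
        intro c' hne'
        simp [List.filter_append, beq_iff_eq, Ne.symm hne']
      have hfiltc : (l ++ [p]).filter (fun q => pvWordCode q == pvWordCode p) = [p] := by
        simp [List.filter_append, hflt0]
      simp only [hget]
      apply PySem.Dict.ext
      rw [PySem.Dict.items_insert_of_not_contains _ _ hcont]
      simp only [pvSpecD]
      rw [hced]
      simp only [List.map_append, List.map_cons, List.map_nil]
      congr 1
      · refine List.map_congr_left (fun c' hc' => ?_)
        have hcc : c' ≠ pvWordCode p := fun h => hmem (h ▸ hc')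
        rw [hfilt c' hcc]
      · simp [pvMx, hfiltc, PySem.List.max?]

theorem pvPropB_eq (freq : PySem.Dict (List Char) Int) (ks : List (List Char)) :
    (ks.foldl (fun g pfx0 => g.modify (pvWordCode pfx0) [] (· ++ [pfx0])) PySem.Dict.empty).items.foldl
      (fun d cp => d.insert cp.1 ((PySem.List.max? cp.2 (fun p => freq.getD p 0)).getD []))
      PySem.Dict.empty
    = pvSpecD freq ks := by
  have hnk : (ks.foldl (fun g pfx0 => g.modify (pvWordCode pfx0) [] (· ++ [pfx0])) PySem.Dict.empty).keys
      = PySem.List.dedup (ks.map pvWordCode) := by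
    rw [PySem.Dict.keys_foldl_modify_key ks pvWordCode ([]) (fun _ p v => v ++ [p]) PySem.Dict.empty]
    simp [pysem, PySem.Set.ofList, PySem.Set.empty, List.foldl_map]
  have hnd : (ks.foldl (fun g pfx0 => g.modify (pvWordCode pfx0) [] (· ++ [pfx0])) PySem.Dict.empty).keys.Nodup := by
    rw [hnk]; exact PySem.List.nodup_dedup _
  have hgetD : ∀ c, (ks.foldl (fun g pfx0 => g.modify (pvWordCode pfx0) [] (· ++ [pfx0])) PySem.Dict.empty).getD c []
      = ks.filter (fun p => pvWordCode p == c) := by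
    intro c
    rw [show (ks.foldl (fun g pfx0 => g.modify (pvWordCode pfx0) [] (· ++ [pfx0])) PySem.Dict.empty)
          = ((ks.map (fun p => (pvWordCode p, p))).foldl
              (fun d q => d.modify q.1 [] (· ++ [q.2])) PySem.Dict.empty) from (List.foldl_map (f := fun p => (pvWordCode p, p)) (g := fun d q => d.modify q.1 [] (· ++ [q.2])) (l := ks) (init := (PySem.Dict.empty : PySem.Dict (List Char) (List (List Char))))).symm,
        PySem.Dict.getD_foldl_modify_append]
    simp [List.filter_map, Function.comp_def]
  have hitems : (ks.foldl (fun g pfx0 => g.modify (pvWordCode pfx0) [] (· ++ [pfx0])) PySem.Dict.empty).items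
      = (PySem.List.dedup (ks.map pvWordCode)).map
          (fun c => (c, ks.filter (fun p => pvWordCode p == c))) := by
    rw [PySem.Dict.items_eq_map_keys _ hnd [], hnk]
    exact List.map_congr_left (fun c _ => by rw [hgetD c])
  rw [hitems]
  apply PySem.Dict.ext
  have hfresh := PySem.Dict.items_foldl_insert_fresh
      ((PySem.List.dedup (ks.map pvWordCode)).map
        (fun c => (c, ks.filter (fun p => pvWordCode p == c))))
      (fun cp => cp.1)
      (fun cp => ((PySem.List.max? cp.2 (fun p => freq.getD p 0)).getD []))
      PySem.Dict.empty
      (fun a _ => PySem.Dict.contains_empty _)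
      (by simp only [List.map_map]
          have h2 : ((fun (cp : List Char × List (List Char)) => cp.1)
              ∘ (fun c => (c, ks.filter (fun p => pvWordCode p == c)))) = fun c => c := rfl
          rw [h2, List.map_id']
          exact PySem.List.nodup_dedup _)
  refine hfresh.trans ?_
  simp [pvSpecD, pvMx, List.map_map, PySem.Dict.empty, Function.comp_def]

-- ===== VERDICT (by name: the statement is the Claim_ definition above) =====
theorem predictive_text_spec : Claim_equal_predictive_text := by
  intro dico _ _
  simp only [Spec_predictive_text, predictive_text, predictive_text_alt]
  rw [← pvFreq_eq, pvPropA_eq, pvPropB_eq]
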